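-- pv_equiv track=rewrite | github.com/matt-grain/AgentLens | src/agentlens/evaluators/rag.py | _is_grounded
-- ===== SOURCE A (Python) =====
-- _GROUNDING_WINDOW: int = 3
--
-- def _is_grounded(sentence: str, doc_contents: list[str]) -> bool:
--     """Return True if any consecutive 3-word window of sentence appears in any document."""
--     words = sentence.split()
--     if len(words) < _GROUNDING_WINDOW:
--         return False
--     for i in range(len(words) - _GROUNDING_WINDOW + 1):
--         phrase = " ".join(words[i : i + _GROUNDING_WINDOW]).lower()
--         if any(phrase in content.lower() for content in doc_contents):
--             return True
--     return False
-- ===== SOURCE B (Python) =====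
-- _GROUNDING_WINDOW: int = 3
--
--
-- def _is_grounded(sentence: str, doc_contents: list[str]) -> bool:
--     """Return True if any consecutive 3-word window of sentence appears in any document.
--
--     Dynamic programming on longest common extensions: build the single lowercased
--     string s = " ".join of the lowercased words, record each window as an (offset,
--     length) pair into s, and for each document compute, right to left, the table
--     lcp(s[i:], t[j:]); a window is grounded iff some column reaches its length at
--     the window's offset.  No per-window substring scans at all.
--     """
--     words = [w.lower() for w in sentence.split()]
--     if len(words) < _GROUNDING_WINDOW:
--         return False
--     s = " ".join(words)
--     windows = []
--     start = 0
--     for i in range(len(words) - _GROUNDING_WINDOW + 1):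
--         windows.append((start, len(words[i]) + len(words[i + 1]) + len(words[i + 2]) + 2))
--         start += len(words[i]) + 1
--     for doc in doc_contents:
--         t = doc.lower()
--         best = [0] * (len(s) + 1)
--         prev = [0] * (len(s) + 1)
--         for j in range(len(t) - 1, -1, -1):
--             cur = [prev[i + 1] + 1 if s[i] == t[j] else 0 for i in range(len(s))] + [0]
--             best = [max(b, c) for b, c in zip(best, cur)]
--             prev = cur
--         if any(best[st] >= ln for st, ln in windows):
--             return True
--     return False
-- ===== Notes on version B (the rewrite author's own statement) =====
-- stated objective: alternative
-- what changed: Replaces per-window substring tests (each re-lowercasing every document) with a longest-common-extension dynamic program: the lowercased words are joined once into a single string s, each window becomes an (offset,length) pair into s, and one right-to-left DP table lcp(s[i:], t[j:]) per document answers all windows at once with no substring scans.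
import Mathlib
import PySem

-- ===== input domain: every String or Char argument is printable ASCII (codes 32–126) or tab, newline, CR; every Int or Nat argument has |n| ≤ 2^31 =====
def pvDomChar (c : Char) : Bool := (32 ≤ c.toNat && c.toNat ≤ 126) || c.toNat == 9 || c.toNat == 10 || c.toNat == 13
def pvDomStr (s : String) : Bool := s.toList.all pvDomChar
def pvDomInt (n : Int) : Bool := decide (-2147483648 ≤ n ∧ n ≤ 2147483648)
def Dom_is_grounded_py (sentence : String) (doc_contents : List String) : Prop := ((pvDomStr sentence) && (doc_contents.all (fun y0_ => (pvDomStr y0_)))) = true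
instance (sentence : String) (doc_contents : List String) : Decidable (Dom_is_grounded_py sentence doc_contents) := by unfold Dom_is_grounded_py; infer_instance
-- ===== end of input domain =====

-- B replaces A's per-window substring tests with a longest-common-extension
-- dynamic program: the lowercased words are joined once into a single string s,
-- each 3-word window becomes an (offset, length) pair into s, and one
-- right-to-left DP table lcp(s[i:], t[j:]) per document answers all windows.

-- ===== PORT A =====
def is_grounded_py (sentence : String) (doc_contents : List String) : Bool :=
  let words := PySem.Str.split₀ sentence
  if (words.length : Int) < 3 then false
  else
    (PySem.List.pyRange 0 ((words.length : Int) - 3 + 1) 1).any (fun i =>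
      let phrase := PySem.Str.lower (PySem.Str.join " " (PySem.List.slice words (some i) (some (i + 3))))
      doc_contents.any (fun content => PySem.Str.isIn phrase (PySem.Str.lower content)))

-- ===== PORT B =====
def is_grounded_py_alt (sentence : String) (doc_contents : List String) : Bool :=
  let words := (PySem.Str.split₀ sentence).map (fun w => PySem.Str.lower w)
  if (words.length : Int) < 3 then false
  else
    let s := PySem.Str.join " " words
    let windows := ((PySem.List.pyRange 0 ((words.length : Int) - 3 + 1) 1).foldl
      (fun (acc : List (Int × Int) × Int) i =>
        (acc.1 ++ [(acc.2,
            PySem.Str.len (PySem.List.pyGetD words i "")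
              + PySem.Str.len (PySem.List.pyGetD words (i + 1) "")
              + PySem.Str.len (PySem.List.pyGetD words (i + 2) "") + 2)],
         acc.2 + PySem.Str.len (PySem.List.pyGetD words i "") + 1))
      ([], 0)).1
    doc_contents.any (fun doc =>
      let t := PySem.Str.lower doc
      let bp := (PySem.List.pyRange (PySem.Str.len t - 1) (-1) (-1)).foldl
        (fun (bp : List Int × List Int) j =>
          let cur := (PySem.List.pyRange 0 (PySem.Str.len s) 1).map (fun i =>
              if PySem.Str.pyGet? s i = PySem.Str.pyGet? t j
              then PySem.List.pyGetD bp.2 (i + 1) 0 + 1 else 0) ++ [(0 : Int)]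
          ((bp.1.zip cur).map (fun bc => max bc.1 bc.2), cur))
        (PySem.List.pyRepeat [(0 : Int)] (PySem.Str.len s + 1),
         PySem.List.pyRepeat [(0 : Int)] (PySem.Str.len s + 1))
      windows.any (fun w => decide (w.2 ≤ PySem.List.pyGetD bp.1 w.1 0)))

-- ===== PRECONDITION & SPEC =====
def Spec_is_grounded_py (sentence : String) (doc_contents : List String) (out : Bool) : Prop := out = is_grounded_py_alt sentence doc_contents
instance (sentence : String) (doc_contents : List String) (out : Bool) : Decidable (Spec_is_grounded_py sentence doc_contents out) := by unfold Spec_is_grounded_py; infer_instance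

-- ===== CLAIM (what is proved, stated in full; the proofs are below) =====
def Claim_equal_is_grounded_py : Prop := ∀ (sentence : String) (doc_contents : List String), Dom_is_grounded_py sentence doc_contents → Spec_is_grounded_py sentence doc_contents (is_grounded_py sentence doc_contents)

-- ===== LEMMAS AND PROOFS =====

def lcpI : List Char → List Char → Int
  | a :: u, b :: v => if a = b then lcpI u v + 1 else 0
  | _, _ => 0

theorem lcpI_nonneg (u v : List Char) : 0 ≤ lcpI u v := by
  induction u generalizing v with
  | nil => cases v <;> simp [lcpI]
  | cons a u ih =>
    cases v with
    | nil => simp [lcpI]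
    | cons b v =>
      simp only [lcpI]
      split_ifs with h
      · have := ih v; omega
      · omega

theorem lcpI_nil_right (u : List Char) : lcpI u [] = 0 := by cases u <;> rfl

def maxlcpL (u : List Char) : List (List Char) → Int
  | [] => 0
  | t :: ts => max (lcpI u t) (maxlcpL u ts)

def suffs (tl : List Char) (j : Nat) : List (List Char) :=
  (List.range' j (tl.length + 1 - j)).map (fun j' => tl.drop j')

theorem le_maxlcpL (u : List Char) (ts : List (List Char)) (t : List Char) (ht : t ∈ ts) :
    lcpI u t ≤ maxlcpL u ts := by
  induction ts with
  | nil => simp at ht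
  | cons s ts ih =>
    rcases List.mem_cons.mp ht with rfl | h
    · simp [maxlcpL]
    · have := ih h; simp only [maxlcpL]; omega

theorem maxlcpL_cases (u : List Char) (ts : List (List Char)) :
    maxlcpL u ts = 0 ∨ ∃ t ∈ ts, maxlcpL u ts = lcpI u t := by
  induction ts with
  | nil => left; rfl
  | cons s ts ih =>
    simp only [maxlcpL]
    rcases max_choice (lcpI u s) (maxlcpL u ts) with h | h
    · rw [h]; right; exact ⟨s, List.mem_cons_self, rfl⟩
    · rw [h]
      rcases ih with h0 | ⟨t, ht, he⟩
      · left; exact h0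
      · right; exact ⟨t, List.mem_cons_of_mem _ ht, he⟩

theorem suffs_cons (tl : List Char) (j : Nat) (hj : j ≤ tl.length) :
    suffs tl j = tl.drop j :: suffs tl (j + 1) := by
  unfold suffs
  rw [show tl.length + 1 - j = (tl.length - j) + 1 by omega, List.range'_succ, List.map_cons,
    show tl.length + 1 - (j + 1) = tl.length - j by omega]

theorem suffs_last (tl : List Char) : suffs tl tl.length = [[]] := by
  unfold suffs
  simp

theorem mem_suffs (tl : List Char) (t : List Char) :
    t ∈ suffs tl 0 ↔ ∃ j ≤ tl.length, t = tl.drop j := by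
  unfold suffs
  simp only [List.mem_map, List.mem_range'_1]
  constructor
  · rintro ⟨j, ⟨h0, hj⟩, rfl⟩; exact ⟨j, by omega, rfl⟩
  · rintro ⟨j, hj, rfl⟩; exact ⟨j, ⟨by omega, by omega⟩, rfl⟩

theorem le_lcpI_iff (n : Nat) (u v : List Char) (hn : n ≤ u.length) :
    (n : Int) ≤ lcpI u v ↔ u.take n <+: v := by
  induction n generalizing u v with
  | zero => simpa using lcpI_nonneg u v
  | succ n ih =>
    cases u with
    | nil => simp at hn
    | cons a u =>
      cases v with
      | nil =>
        rw [lcpI_nil_right]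
        simp
      | cons b v =>
        simp only [lcpI, List.take_succ_cons, List.cons_prefix_cons]
        split_ifs with h
        · rw [show ((n + 1 : Nat) : Int) ≤ lcpI u v + 1 ↔ (n : Int) ≤ lcpI u v by push_cast; omega]
          rw [ih u v (by simpa using hn)]
          simp [h]
        · constructor
          · intro hle; exfalso; omega
          · rintro ⟨rfl, -⟩; exact absurd rfl h

theorem infix_iff_prefix_drop (p v : List Char) :
    p <:+: v ↔ ∃ j ≤ v.length, p <+: v.drop j := by
  constructor
  · rintro ⟨a, b, rfl⟩
    refine ⟨a.length, by simp, ?_⟩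
    rw [show a ++ p ++ b = a ++ (p ++ b) by simp, List.drop_left]
    exact ⟨b, rfl⟩
  · rintro ⟨j, hj, hp⟩
    exact hp.isInfix.trans (List.drop_suffix j v).isInfix

theorem lcpI_nil_left (v : List Char) : lcpI [] v = 0 := by cases v <;> rfl

/-- Character offset of word k in the space-joined list of words. -/
def offL (ws : List (List Char)) (k : Nat) : Nat :=
  ((ws.take k).map (fun w => w.length + 1)).sum

theorem offL_zero (ws : List (List Char)) : offL ws 0 = 0 := rfl

theorem offL_cons_succ (w : List Char) (ws : List (List Char)) (k : Nat) :
    offL (w :: ws) (k + 1) = (w.length + 1) + offL ws k := by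
  simp [offL]

theorem lower_join (ws : List (List Char)) :
    PySem.Chars.lower (PySem.Chars.join [' '] ws)
      = PySem.Chars.join [' '] (ws.map PySem.Chars.lower) := by
  induction ws with
  | nil => simp [PySem.Chars.join_nil, PySem.Chars.lower]
  | cons w ws ih =>
    cases ws with
    | nil => simp [PySem.Chars.join_singleton]
    | cons e r =>
      rw [PySem.Chars.join_cons_cons, show List.map PySem.Chars.lower (w :: e :: r) = PySem.Chars.lower w :: PySem.Chars.lower e :: List.map PySem.Chars.lower r from rfl, PySem.Chars.join_cons_cons]
      unfold PySem.Chars.lower at ih ⊢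
      rw [List.map_append, List.map_append, show List.map PySem.Chars.lowerChar [' '] = [' '] by decide]
      rw [show (PySem.Chars.join [' ']
          (List.map PySem.Chars.lowerChar e :: List.map (fun s => List.map PySem.Chars.lowerChar s) r))
          = PySem.Chars.join [' '] (List.map (fun s => List.map PySem.Chars.lowerChar s) (e :: r)) from rfl, ← ih]

theorem drop_join (k : Nat) : ∀ (ws : List (List Char)), k ≤ ws.length →
    (PySem.Chars.join [' '] ws).drop (offL ws k) = PySem.Chars.join [' '] (ws.drop k) := by
  induction k with
  | zero => intro ws _; simp [offL_zero]
  | succ k ih =>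
    intro ws hk
    cases ws with
    | nil => simp at hk
    | cons w ws =>
      rw [offL_cons_succ, List.drop_succ_cons]
      cases ws with
      | nil =>
        simp only [List.length_cons, List.length_nil] at hk
        have hk0 : k = 0 := by omega
        subst hk0
        rw [PySem.Chars.join_singleton]
        simp [offL_zero, PySem.Chars.join_nil]
      | cons e r =>
        rw [PySem.Chars.join_cons_cons, List.append_assoc, List.drop_append,
          List.drop_eq_nil_of_le (by omega), List.nil_append,
          show w.length + 1 + offL (e :: r) k - w.length = 1 + offL (e :: r) k by omega]
        have : (([' '] ++ PySem.Chars.join [' '] (e :: r)).drop (1 + offL (e :: r) k))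
            = (PySem.Chars.join [' '] (e :: r)).drop (offL (e :: r) k) := by
          rw [List.drop_append, List.drop_eq_nil_of_le (by simp),
            show 1 + offL (e :: r) k - ([' '] : List Char).length = offL (e :: r) k by simp]
          simp
        rw [this, ih (e :: r) (by simpa using hk)]

theorem join3_eq (w1 w2 w3 : List Char) :
    PySem.Chars.join [' '] [w1, w2, w3] = w1 ++ ' ' :: (w2 ++ ' ' :: w3) := by
  rw [PySem.Chars.join_cons_cons, PySem.Chars.join_cons_cons, PySem.Chars.join_singleton]
  simp

theorem take_join3 (w1 w2 w3 : List Char) (rest : List (List Char)) :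
    (PySem.Chars.join [' '] (w1 :: w2 :: w3 :: rest)).take (w1.length + w2.length + w3.length + 2)
      = w1 ++ ' ' :: (w2 ++ ' ' :: w3) := by
  cases rest with
  | nil =>
    rw [join3_eq]
    have hlen : (w1 ++ ' ' :: (w2 ++ ' ' :: w3)).length = w1.length + w2.length + w3.length + 2 := by
      simp; omega
    rw [← hlen, List.take_length]
  | cons e r =>
    rw [PySem.Chars.join_cons_cons, PySem.Chars.join_cons_cons, PySem.Chars.join_cons_cons]
    rw [show w1.length + w2.length + w3.length + 2
        = (w1 ++ [' ']).length + (w2.length + w3.length + 1) by simp; omega]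
    rw [List.take_append, List.take_of_length_le (Nat.le_add_right _ _), Nat.add_sub_cancel_left]
    rw [show w2.length + w3.length + 1 = (w2 ++ [' ']).length + w3.length by simp; omega]
    rw [List.take_append, List.take_of_length_le (Nat.le_add_right _ _), Nat.add_sub_cancel_left]
    rw [List.take_append, show w3.length - (w3 ++ [' ']).length = 0 by simp, List.take_zero,
      List.append_nil, List.take_append, List.take_of_length_le (le_refl _),
      show w3.length - w3.length = 0 by omega, List.take_zero, List.append_nil]
    simp

/-- prev row of the DP at column j. -/
def prow (sl tl : List Char) (j : Nat) : List Int :=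
  (List.range (sl.length + 1)).map (fun i => lcpI (sl.drop i) (tl.drop j))

/-- best row of the DP after processing columns ≥ j. -/
def brow (sl tl : List Char) (j : Nat) : List Int :=
  (List.range (sl.length + 1)).map (fun i => maxlcpL (sl.drop i) (suffs tl j))

theorem brow_last (sl tl : List Char) :
    brow sl tl tl.length = List.replicate (sl.length + 1) 0 := by
  unfold brow
  rw [suffs_last]
  rw [show (fun i => maxlcpL (sl.drop i) [[]]) = (fun _ : Nat => (0 : Int)) by
    funext i; simp [maxlcpL, lcpI_nil_right]]
  simp [List.map_const']

theorem prow_last (sl tl : List Char) :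
    prow sl tl tl.length = List.replicate (sl.length + 1) 0 := by
  unfold prow
  rw [show (fun i => lcpI (sl.drop i) (tl.drop tl.length)) = (fun _ : Nat => (0 : Int)) by
    funext i; simp [lcpI_nil_right]]
  simp [List.map_const']

theorem cur_eq (s t : String) (j : Nat) (hj : j < t.toList.length) :
    ((PySem.List.pyRange 0 (PySem.Str.len s) 1).map (fun i =>
        if PySem.Str.pyGet? s i = PySem.Str.pyGet? t (j : Int)
        then PySem.List.pyGetD (prow s.toList t.toList (j + 1)) (i + 1) 0 + 1 else 0) ++ [(0 : Int)])
      = prow s.toList t.toList j := by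
  rw [PySem.Str.len_eq, PySem.List.pyRange_zero_natCast, List.map_map]
  conv_rhs => rw [prow, List.range_succ, List.map_append]
  congr 1
  · apply List.map_congr_left
    intro k hk
    rw [List.mem_range] at hk
    show (if PySem.Str.pyGet? s (k : Int) = PySem.Str.pyGet? t (j : Int)
        then PySem.List.pyGetD (prow s.toList t.toList (j + 1)) ((k : Int) + 1) 0 + 1 else 0)
      = lcpI (s.toList.drop k) (t.toList.drop j)
    rw [show ((k : Int) + 1) = ((k + 1 : Nat) : Int) by push_cast; ring]
    rw [PySem.List.pyGetD_natCast]
    rw [show PySem.Str.pyGet? s (k : Int) = s.toList[k]? from PySem.List.pyGet?_natCast _ _]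
    rw [show PySem.Str.pyGet? t (j : Int) = t.toList[j]? from PySem.List.pyGet?_natCast _ _]
    rw [List.getElem?_eq_getElem hk, List.getElem?_eq_getElem hj]
    rw [List.drop_eq_getElem_cons hk, List.drop_eq_getElem_cons hj]
    show _ = lcpI (s.toList[k] :: _) (t.toList[j] :: _)
    rw [show lcpI (s.toList[k] :: s.toList.drop (k + 1)) (t.toList[j] :: t.toList.drop (j + 1))
        = if s.toList[k] = t.toList[j]
          then lcpI (s.toList.drop (k + 1)) (t.toList.drop (j + 1)) + 1 else 0 from rfl]
    rw [prow, PySem.List.getD_map_range _ _ _ _ (by omega)]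
    simp only [Option.some.injEq]
  · rw [List.map_cons, List.map_nil, List.drop_length, lcpI_nil_left]

theorem zipmax_eq (sl tl : List Char) (j : Nat) (hj : j ≤ tl.length) :
    ((brow sl tl (j + 1)).zip (prow sl tl j)).map (fun bc => max bc.1 bc.2) = brow sl tl j := by
  unfold brow prow
  rw [List.zip_map', List.map_map]
  apply List.map_congr_left
  intro i _
  show max (maxlcpL (sl.drop i) (suffs tl (j + 1))) (lcpI (sl.drop i) (tl.drop j))
      = maxlcpL (sl.drop i) (suffs tl j)
  rw [suffs_cons tl j hj]
  show _ = max (lcpI (sl.drop i) (tl.drop j)) (maxlcpL (sl.drop i) (suffs tl (j + 1)))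
  exact max_comm _ _

theorem dp_fold (s t : String) : ∀ j : Nat, j ≤ t.toList.length →
    (PySem.List.pyRange ((j : Int) - 1) (-1) (-1)).foldl
      (fun (bp : List Int × List Int) jj =>
        let cur := (PySem.List.pyRange 0 (PySem.Str.len s) 1).map (fun i =>
            if PySem.Str.pyGet? s i = PySem.Str.pyGet? t jj
            then PySem.List.pyGetD bp.2 (i + 1) 0 + 1 else 0) ++ [(0 : Int)]
        ((bp.1.zip cur).map (fun bc => max bc.1 bc.2), cur))
      (brow s.toList t.toList j, prow s.toList t.toList j)
    = (brow s.toList t.toList 0, prow s.toList t.toList 0) := by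
  intro j
  induction j with
  | zero => intro _; rw [show ((0 : Nat) : Int) - 1 = -1 by norm_num,
      PySem.List.pyRange_neg_one_eq_nil (le_refl _), List.foldl_nil]
  | succ j ih =>
    intro hj
    rw [show ((j + 1 : Nat) : Int) - 1 = (j : Int) by push_cast; ring]
    rw [PySem.List.pyRange_neg_one_cons (by omega), List.foldl_cons]
    have hstep : ((((brow s.toList t.toList (j + 1)).zip
          ((PySem.List.pyRange 0 (PySem.Str.len s) 1).map (fun i =>
            if PySem.Str.pyGet? s i = PySem.Str.pyGet? t (j : Int)
            then PySem.List.pyGetD (prow s.toList t.toList (j + 1)) (i + 1) 0 + 1 else 0) ++ [(0 : Int)])).map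
            (fun bc => max bc.1 bc.2),
          (PySem.List.pyRange 0 (PySem.Str.len s) 1).map (fun i =>
            if PySem.Str.pyGet? s i = PySem.Str.pyGet? t (j : Int)
            then PySem.List.pyGetD (prow s.toList t.toList (j + 1)) (i + 1) 0 + 1 else 0) ++ [(0 : Int)])
        : List Int × List Int)
        = (brow s.toList t.toList j, prow s.toList t.toList j) := by
      rw [cur_eq s t j (by omega), zipmax_eq s.toList t.toList j (by omega)]
    dsimp only
    rw [hstep]
    exact ih (by omega)

def offW (words : List String) (k : Nat) : Nat := offL (words.map String.toList) k

def needW (words : List String) (k : Nat) : Nat :=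
  (words.getD k "").toList.length + (words.getD (k + 1) "").toList.length
    + (words.getD (k + 2) "").toList.length + 2

theorem offL_succ (ws : List (List Char)) (n : Nat) (hn : n < ws.length) :
    offL ws (n + 1) = offL ws n + ((ws.getD n []).length + 1) := by
  unfold offL
  rw [show ws.take (n + 1) = ws.take n ++ [ws[n]] by
      rw [List.take_add_one, List.getElem?_eq_getElem hn]; rfl]
  rw [List.map_append, List.sum_append, List.getD_eq_getElem _ _ hn]
  simp

theorem getD_map_toList (words : List String) (n : Nat) (hn : n < words.length) :
    (words.map String.toList).getD n [] = (words.getD n "").toList := by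
  rw [List.getD_eq_getElem _ _ (by simpa using hn), List.getD_eq_getElem _ _ hn,
    List.getElem_map]

theorem win_fold (words : List String) : ∀ n : Nat, n + 2 ≤ words.length →
    (PySem.List.pyRange 0 (n : Int) 1).foldl
      (fun (acc : List (Int × Int) × Int) i =>
        (acc.1 ++ [(acc.2,
            PySem.Str.len (PySem.List.pyGetD words i "")
              + PySem.Str.len (PySem.List.pyGetD words (i + 1) "")
              + PySem.Str.len (PySem.List.pyGetD words (i + 2) "") + 2)],
         acc.2 + PySem.Str.len (PySem.List.pyGetD words i "") + 1))
      ([], 0)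
    = ((List.range n).map (fun k => ((offW words k : Int), (needW words k : Int))),
        (offW words n : Int)) := by
  intro n
  induction n with
  | zero =>
    intro _
    rw [show ((0 : Nat) : Int) = 0 from rfl, PySem.List.pyRange_one_eq_nil (le_refl _),
      List.foldl_nil]
    simp [offW, offL]
  | succ n ih =>
    intro hn
    rw [show ((n + 1 : Nat) : Int) = (n : Int) + 1 by push_cast; ring,
      PySem.List.pyRange_one_succ_right (by omega), List.foldl_append,
      ih (by omega), List.foldl_cons, List.foldl_nil]
    have hg : ∀ m : Nat, m < words.length →
        PySem.Str.len (PySem.List.pyGetD words (m : Int) "")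
          = ((words.getD m "").toList.length : Int) := by
      intro m hm
      rw [PySem.List.pyGetD_natCast, PySem.Str.len_eq]
    dsimp only
    rw [show (n : Int) + 1 = ((n + 1 : Nat) : Int) by push_cast; ring,
      show (n : Int) + 2 = ((n + 2 : Nat) : Int) by push_cast; ring]
    rw [hg n (by omega), hg (n + 1) (by omega), hg (n + 2) (by omega)]
    refine Prod.ext ?_ ?_
    · show (List.range n).map _ ++ [((offW words n : Int), _)] = _
      rw [List.range_succ, List.map_append, List.map_cons, List.map_nil]
      have hne : ((needW words n : Nat) : Int)
          = ((words.getD n "").toList.length : Int) + ((words.getD (n + 1) "").toList.length : Int)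
            + ((words.getD (n + 2) "").toList.length : Int) + 2 := by
        unfold needW; push_cast; ring
      rw [hne]
    · show (offW words n : Int) + ((words.getD n "").toList.length : Int) + 1
        = ((offW words (n + 1) : Nat) : Int)
      rw [show (offW words (n + 1) : Nat) = offW words n + ((words.getD n "").toList.length + 1) by
        unfold offW
        rw [offL_succ _ _ (by simpa using (by omega : n < words.length)),
          getD_map_toList _ _ (by omega)]]
      push_cast; ring

theorem take3_cons {α : Type} (a b c : α) (r : List α) : List.take 3 (a :: b :: c :: r) = [a, b, c] := rfl

def needL (ws : List (List Char)) (k : Nat) : Nat :=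
  (ws.getD k []).length + (ws.getD (k + 1) []).length + (ws.getD (k + 2) []).length + 2

theorem drop_take_join (ws : List (List Char)) (k : Nat) (hk : k + 3 ≤ ws.length) :
    ((PySem.Chars.join [' '] ws).drop (offL ws k)).take (needL ws k)
      = PySem.Chars.join [' '] ((ws.drop k).take 3) := by
  have hd : ws.drop k = ws[k] :: ws[k + 1] :: ws[k + 2] :: ws.drop (k + 3) := by
    rw [List.drop_eq_getElem_cons (by omega), List.drop_eq_getElem_cons (by omega),
      List.drop_eq_getElem_cons (by omega)]
    norm_num
  rw [drop_join k ws (by omega), hd]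
  have hne : needL ws k = (ws[k]).length + (ws[k + 1]).length + (ws[k + 2]).length + 2 := by
    unfold needL
    rw [List.getD_eq_getElem _ _ (by omega), List.getD_eq_getElem _ _ (by omega),
      List.getD_eq_getElem _ _ (by omega)]
    norm_num
    rfl
  rw [hne, take_join3, take3_cons, join3_eq]

theorem any_swap {α β : Type} (l : List α) (m : List β) (f : α → β → Bool) :
    l.any (fun x => m.any (fun y => f x y)) = m.any (fun y => l.any (fun x => f x y)) := by
  rw [Bool.eq_iff_iff]
  simp only [List.any_eq_true]
  tauto

theorem length_join3 (u1 u2 u3 : List Char) :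
    (u1 ++ ' ' :: (u2 ++ ' ' :: u3)).length = u1.length + u2.length + u3.length + 2 := by
  simp
  omega

/-- The grounded test for one window against one text, via the DP row. -/
theorem window_iff (sl tl : List Char) (off need : Nat)
    (hoff : off ≤ sl.length) (hneed : need ≤ (sl.drop off).length) (hpos : 0 < need) :
    (decide ((need : Int) ≤ PySem.List.pyGetD (brow sl tl 0) (off : Int) 0))
      = PySem.Chars.isIn ((sl.drop off).take need) tl := by
  rw [PySem.List.pyGetD_natCast, brow, PySem.List.getD_map_range _ _ _ _ (by omega)]
  rw [Bool.eq_iff_iff, decide_eq_true_iff, PySem.Chars.isIn_iff_infix,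
    infix_iff_prefix_drop]
  constructor
  · intro h
    rcases maxlcpL_cases (sl.drop off) (suffs tl 0) with h0 | ⟨u, hu, he⟩
    · rw [h0] at h; omega
    · rw [he] at h
      rcases (mem_suffs tl u).mp hu with ⟨j, hj, rfl⟩
      exact ⟨j, hj, (le_lcpI_iff need (sl.drop off) (tl.drop j) hneed).mp h⟩
  · rintro ⟨j, hj, hp⟩
    have h1 := (le_lcpI_iff need (sl.drop off) (tl.drop j) hneed).mpr hp
    have h2 := le_maxlcpL (sl.drop off) (suffs tl 0) (tl.drop j)
      ((mem_suffs tl (tl.drop j)).mpr ⟨j, hj, rfl⟩)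
    omega


/-- One window against one text at the Str level, via the DP row. -/
theorem per_window (p t s : String) (off need : Nat)
    (hp : p.toList = (s.toList.drop off).take need)
    (hoff : off ≤ s.toList.length) (hneed : need ≤ (s.toList.drop off).length)
    (hpos : 0 < need) :
    PySem.Str.isIn p t
      = decide ((need : Int) ≤ PySem.List.pyGetD (brow s.toList t.toList 0) (off : Int) 0) := by
  rw [PySem.Str.isIn_eq, hp]
  exact (window_iff s.toList t.toList off need hoff hneed hpos).symm


theorem needL_len (ws : List (List Char)) (k : Nat) (hk : k + 3 ≤ ws.length) :
    (PySem.Chars.join [' '] ((ws.drop k).take 3)).length = needL ws k := by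
  have hd : ws.drop k = ws[k] :: ws[k + 1] :: ws[k + 2] :: ws.drop (k + 3) := by
    rw [List.drop_eq_getElem_cons (by omega), List.drop_eq_getElem_cons (by omega),
      List.drop_eq_getElem_cons (by omega)]
    norm_num
  rw [hd, take3_cons, join3_eq, length_join3]
  unfold needL
  rw [List.getD_eq_getElem _ _ (by omega), List.getD_eq_getElem _ _ (by omega),
    List.getD_eq_getElem _ _ (by omega)]
  rfl

-- ===== VERDICT (by name: the statement is the Claim_ definition above) =====
theorem is_grounded_py_spec : Claim_equal_is_grounded_py := by
  intro sentence doc_contents _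
  unfold Spec_is_grounded_py is_grounded_py is_grounded_py_alt
  dsimp only
  rw [List.length_map]
  generalize PySem.Str.split₀ sentence = wsA
  by_cases hW : ((wsA.length : Int) < 3)
  · rw [if_pos hW, if_pos hW]
  · rw [if_neg hW, if_neg hW]
    set W := wsA.length with hWdef
    have hW3 : 3 ≤ W := by omega
    set words := wsA.map (fun w => PySem.Str.lower w) with hwords
    set wsl := wsA.map (fun w => PySem.Chars.lower w.toList) with hwsl
    have hmt : words.map String.toList = wsl := by
      rw [hwords, hwsl, List.map_map]
      apply List.map_congr_left
      intro w _
      exact PySem.Str.toList_lower w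
    have hlenw : words.length = W := by rw [hwords, List.length_map]
    have hsl : (PySem.Str.join " " words).toList = PySem.Chars.join [' '] wsl := by
      rw [PySem.Str.toList_join, hmt, show (" " : String).toList = [' '] from by decide]
    have hlenwsl : wsl.length = W := by rw [hwsl, List.length_map]
    have hgetD : ∀ m, m < W → (words.getD m "").toList = wsl.getD m [] := by
      intro m hm
      rw [← getD_map_toList words m (by omega), hmt]
    have hneedWL : ∀ k, k < W - 2 → needW words k = needL wsl k := by
      intro k hk
      unfold needW needL
      rw [hgetD k (by omega), hgetD (k + 1) (by omega), hgetD (k + 2) (by omega)]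
    have hoffWL : ∀ k, offW words k = offL wsl k := by
      intro k
      unfold offW
      rw [hmt]
    have hbound : (W : Int) - 3 + 1 = ((W - 2 : Nat) : Int) := by omega
    rw [hbound, win_fold words (W - 2) (by omega), PySem.List.pyRange_zero_natCast,
      List.any_map]
    dsimp only [Function.comp_def]
    rw [any_swap _ _ (fun (k : Nat) content =>
        PySem.Str.isIn
          (PySem.Str.lower (PySem.Str.join " " (PySem.List.slice wsA (some ((k : Nat) : Int)) (some (((k : Nat) : Int) + 3)))))
          (PySem.Str.lower content))]
    apply PySem.List.any_congr_mem
    intro doc _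
    have hinit :
        ((PySem.List.pyRepeat [(0 : Int)] (PySem.Str.len (PySem.Str.join " " words) + 1),
          PySem.List.pyRepeat [(0 : Int)] (PySem.Str.len (PySem.Str.join " " words) + 1))
          : List Int × List Int)
        = (brow (PySem.Str.join " " words).toList (PySem.Str.lower doc).toList (PySem.Str.lower doc).toList.length,
           prow (PySem.Str.join " " words).toList (PySem.Str.lower doc).toList (PySem.Str.lower doc).toList.length) := by
      rw [brow_last, prow_last, PySem.List.pyRepeat_singleton,
        show (PySem.Str.len (PySem.Str.join " " words) + 1).toNat
            = (PySem.Str.join " " words).toList.length + 1 by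
          rw [PySem.Str.len_eq]; omega]
    rw [show PySem.Str.len (PySem.Str.lower doc) - 1 = ((PySem.Str.lower doc).toList.length : Int) - 1 from by rw [PySem.Str.len_eq]]
    rw [hinit, dp_fold (PySem.Str.join " " words) (PySem.Str.lower doc) (PySem.Str.lower doc).toList.length (le_refl _)]
    rw [List.any_map]
    apply PySem.List.any_congr_mem
    intro k hk
    rw [List.mem_range] at hk
    have hk3 : k + 3 ≤ W := by omega
    dsimp only [Function.comp_def]
    have hslice : PySem.List.slice wsA (some ((k : Nat) : Int)) (some (((k : Nat) : Int) + 3))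
        = (wsA.drop k).take 3 := by
      rw [show (((k : Nat) : Int) + 3) = ((k : Nat) : Int) + ((3 : Nat) : Int) by norm_num,
        PySem.List.slice_natCast_add]
    have hphrase : (PySem.Str.lower (PySem.Str.join " " (PySem.List.slice wsA (some ((k : Nat) : Int)) (some (((k : Nat) : Int) + 3))))).toList
        = PySem.Chars.join [' '] ((wsl.drop k).take 3) := by
      rw [hslice, PySem.Str.toList_lower, PySem.Str.toList_join,
        show (" " : String).toList = [' '] from by decide, lower_join,
        List.map_take, List.map_take, List.map_drop, List.map_drop, List.map_map, hwsl]
      rfl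
    have hdtj := drop_take_join wsl k (by omega)
    have hlen3 := needL_len wsl k (by omega)
    have hneed_le : needL wsl k ≤ ((PySem.Chars.join [' '] wsl).drop (offL wsl k)).length := by
      have hc := congrArg List.length hdtj
      rw [List.length_take, hlen3] at hc
      rw [Nat.min_def] at hc
      split_ifs at hc
      · assumption
      · omega
    have hoff_le : offL wsl k ≤ (PySem.Chars.join [' '] wsl).length := by
      rw [List.length_drop] at hneed_le
      have : 0 < needL wsl k := by unfold needL; omega
      omega
    have hoffe := hoffWL k
    have hneede := hneedWL k hk
    have hp : (PySem.Str.lower (PySem.Str.join " " (PySem.List.slice wsA (some ((k : Nat) : Int)) (some (((k : Nat) : Int) + 3))))).toList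
        = ((PySem.Str.join " " words).toList.drop (offW words k)).take (needW words k) := by
      rw [hneede, hoffe, hsl]
      exact hphrase.trans hdtj.symm
    have h1 : offW words k ≤ (PySem.Str.join " " words).toList.length := by
      rw [hoffe, hsl]; exact hoff_le
    have h2 : needW words k ≤ ((PySem.Str.join " " words).toList.drop (offW words k)).length := by
      rw [hneede, hoffe, hsl]; exact hneed_le
    have h3 : 0 < needW words k := by rw [hneede]; unfold needL; omega
    exact per_window _ (PySem.Str.lower doc) (PySem.Str.join " " words)
      (offW words k) (needW words k) hp h1 h2 h3
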